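-- pv_equiv track=rewrite | github.com/elgerytme/Pynomaly | src/packages/data_profiling/application/services/pattern_discovery_service.py | _generate_middle_pattern
-- ===== SOURCE A (Python) =====
-- from typing import Dict, List, Optional, Tuple, Any
--
-- def _generate_middle_pattern(middle_parts: List[str]) -> str:
--     """Generate regex pattern for the variable middle parts."""
--     if not middle_parts:
--         return ''
--
--     # Analyze character types in middle parts
--     has_digits = any(any(c.isdigit() for c in part) for part in middle_parts)
--     has_letters = any(any(c.isalpha() for c in part) for part in middle_parts)
--     has_special = any(any(not c.isalnum() for c in part) for part in middle_parts)
--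
--     # Generate appropriate pattern
--     if has_digits and has_letters and has_special:
--         return r'.*'
--     elif has_digits and has_letters:
--         return r'[a-zA-Z0-9]+'
--     elif has_digits:
--         return r'\d+'
--     elif has_letters:
--         return r'[a-zA-Z]+'
--     else:
--         return r'.*'
-- ===== SOURCE B (Python) =====
-- def _generate_middle_pattern(middle_parts):
--     """Generate regex pattern for the variable middle parts."""
--     if not middle_parts:
--         return ''
--
--     # Single pass over every character, with early exit once all flags are set
--     has_digits = has_letters = has_special = False
--     for part in middle_parts:
--         for c in part:
--             if c.isdigit():
--                 has_digits = True
--             if c.isalpha():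
--                 has_letters = True
--             if not c.isalnum():
--                 has_special = True
--             if has_digits and has_letters and has_special:
--                 return r'.*'
--
--     if has_digits and has_letters and has_special:
--         return r'.*'
--     elif has_digits and has_letters:
--         return r'[a-zA-Z0-9]+'
--     elif has_digits:
--         return r'\d+'
--     elif has_letters:
--         return r'[a-zA-Z]+'
--     else:
--         return r'.*'
-- ===== Notes on version B (the rewrite author's own statement) =====
-- stated objective: faster
-- what changed: Replaces the three separate any(any(...)) full scans over all parts with one early-terminating pass over the characters that maintains the three flags in place and returns '.*' as soon as all three are set.
import Mathlib
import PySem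

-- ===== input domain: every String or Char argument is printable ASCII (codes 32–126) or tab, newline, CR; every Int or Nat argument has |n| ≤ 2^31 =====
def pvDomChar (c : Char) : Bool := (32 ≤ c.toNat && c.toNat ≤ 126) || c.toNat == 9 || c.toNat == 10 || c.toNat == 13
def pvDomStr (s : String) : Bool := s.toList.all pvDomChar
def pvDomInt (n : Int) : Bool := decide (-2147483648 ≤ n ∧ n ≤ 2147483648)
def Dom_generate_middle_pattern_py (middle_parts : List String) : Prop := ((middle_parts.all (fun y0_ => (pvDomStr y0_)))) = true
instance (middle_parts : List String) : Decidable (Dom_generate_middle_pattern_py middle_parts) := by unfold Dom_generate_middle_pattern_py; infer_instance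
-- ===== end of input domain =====

-- B replaces A's three separate full any(any(...)) scans with one early-exiting pass
-- over all characters that maintains the three flags in place (alternative decomposition).

-- ===== PORT A =====
def generate_middle_pattern_py (middle_parts : List String) : String :=
  if middle_parts.isEmpty then ""
  else
    let has_digits := middle_parts.any (fun part => part.toList.any (fun c => PySem.Chars.isdigit c))
    let has_letters := middle_parts.any (fun part => part.toList.any (fun c => PySem.Chars.isalpha c))
    let has_special := middle_parts.any (fun part => part.toList.any (fun c => !PySem.Chars.isalnum c))
    if has_digits && has_letters && has_special then ".*"
    else if has_digits && has_letters then "[a-zA-Z0-9]+"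
    else if has_digits then "\\d+"
    else if has_letters then "[a-zA-Z]+"
    else ".*"

-- ===== PORT B =====
-- inner loop of Source B: scan one part's chars; snd = true means the early `return '.*'` fired
def pvScanChars : List Char → Bool → Bool → Bool → ((Bool × Bool × Bool) × Bool)
  | [], d, l, s => ((d, l, s), false)
  | c :: cs, d, l, s =>
      let d := if PySem.Chars.isdigit c then true else d
      let l := if PySem.Chars.isalpha c then true else l
      let s := if !PySem.Chars.isalnum c then true else s
      if d && l && s then ((d, l, s), true) else pvScanChars cs d l s

-- outer loop of Source B over the parts, propagating the early return
def pvScanParts : List String → Bool → Bool → Bool → ((Bool × Bool × Bool) × Bool)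
  | [], d, l, s => ((d, l, s), false)
  | p :: ps, d, l, s =>
      match pvScanChars p.toList d l s with
      | (fl, true) => (fl, true)
      | ((d', l', s'), false) => pvScanParts ps d' l' s'

def generate_middle_pattern_py_alt (middle_parts : List String) : String :=
  if middle_parts.isEmpty then ""
  else
    match pvScanParts middle_parts false false false with
    | (_, true) => ".*"
    | ((d, l, s), false) =>
      if d && l && s then ".*"
      else if d && l then "[a-zA-Z0-9]+"
      else if d then "\\d+"
      else if l then "[a-zA-Z]+"
      else ".*"

-- ===== PRECONDITION & SPEC =====
def Spec_generate_middle_pattern_py (middle_parts : List String) (out : String) : Prop := out = generate_middle_pattern_py_alt middle_parts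
instance (middle_parts : List String) (out : String) : Decidable (Spec_generate_middle_pattern_py middle_parts out) := by unfold Spec_generate_middle_pattern_py; infer_instance

-- ===== CLAIM (what is proved, stated in full; the proofs are below) =====
def Claim_equal_generate_middle_pattern_py : Prop := ∀ (middle_parts : List String), Dom_generate_middle_pattern_py middle_parts → Spec_generate_middle_pattern_py middle_parts (generate_middle_pattern_py middle_parts)

-- ===== LEMMAS AND PROOFS =====

-- the char scan computes exactly "initial flag OR a matching char exists",
-- and an early exit only happens with all three flags set
-- one unfolding step of the char scan, with the flag updates written as disjunctions
theorem pvScanChars_cons (c : Char) (cs : List Char) (d l s : Bool) :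
    pvScanChars (c :: cs) d l s =
      (if (d || PySem.Chars.isdigit c) && (l || PySem.Chars.isalpha c) && (s || !PySem.Chars.isalnum c) then
        ((d || PySem.Chars.isdigit c, l || PySem.Chars.isalpha c, s || !PySem.Chars.isalnum c), true)
      else pvScanChars cs (d || PySem.Chars.isdigit c) (l || PySem.Chars.isalpha c) (s || !PySem.Chars.isalnum c)) := by
  cases hd : PySem.Chars.isdigit c <;> cases hl : PySem.Chars.isalpha c <;>
    cases hs : PySem.Chars.isalnum c <;> simp [pvScanChars, hd, hl, hs]

theorem pvScanChars_spec (cs : List Char) (d l s : Bool) :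
    (pvScanChars cs d l s).1 =
      (d || cs.any (fun c => PySem.Chars.isdigit c),
       l || cs.any (fun c => PySem.Chars.isalpha c),
       s || cs.any (fun c => !PySem.Chars.isalnum c)) ∧
    ((pvScanChars cs d l s).2 = true → (pvScanChars cs d l s).1 = (true, true, true)) := by
  induction cs generalizing d l s with
  | nil => simp [pvScanChars]
  | cons c cs ih =>
    rw [pvScanChars_cons]
    by_cases hc : ((d || PySem.Chars.isdigit c) && (l || PySem.Chars.isalpha c) && (s || !PySem.Chars.isalnum c)) = true
    · simp only [Bool.and_eq_true] at hc
      obtain ⟨⟨h1, h2⟩, h3⟩ := hc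
      have g1 : (d || (PySem.Chars.isdigit c || cs.any (fun c => PySem.Chars.isdigit c))) = true := by
        rcases Bool.or_eq_true_iff.mp h1 with h | h <;> simp [h]
      have g2 : (l || (PySem.Chars.isalpha c || cs.any (fun c => PySem.Chars.isalpha c))) = true := by
        rcases Bool.or_eq_true_iff.mp h2 with h | h <;> simp [h]
      have g3 : (s || (!PySem.Chars.isalnum c || cs.any (fun c => !PySem.Chars.isalnum c))) = true := by
        rcases Bool.or_eq_true_iff.mp h3 with h | h <;> simp [h]
      simp [h1, h2, h3, g1, g2, g3]
    · obtain ⟨ih1, ih2⟩ := ih (d || PySem.Chars.isdigit c) (l || PySem.Chars.isalpha c) (s || !PySem.Chars.isalnum c)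
      simp only [hc, Bool.false_eq_true, if_false, List.any_cons]
      refine ⟨?_, ih2⟩
      rw [ih1]; simp [Bool.or_assoc]

theorem pvScanParts_spec (ps : List String) (d l s : Bool) :
    (pvScanParts ps d l s).1 =
      (d || ps.any (fun p => p.toList.any (fun c => PySem.Chars.isdigit c)),
       l || ps.any (fun p => p.toList.any (fun c => PySem.Chars.isalpha c)),
       s || ps.any (fun p => p.toList.any (fun c => !PySem.Chars.isalnum c))) ∧
    ((pvScanParts ps d l s).2 = true → (pvScanParts ps d l s).1 = (true, true, true)) := by
  induction ps generalizing d l s with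
  | nil => simp [pvScanParts]
  | cons p ps ih =>
    simp only [pvScanParts, List.any_cons]
    obtain ⟨c1, c2⟩ := pvScanChars_spec p.toList d l s
    rcases he : pvScanChars p.toList d l s with ⟨⟨d', l', s'⟩, e⟩
    rw [he] at c1 c2
    simp only [Prod.mk.injEq] at c1
    obtain ⟨a1, a2, a3⟩ := c1
    cases e with
    | true =>
      have hall := c2 rfl
      simp only [Prod.mk.injEq] at hall
      obtain ⟨b1, b2, b3⟩ := hall
      have h1 := Bool.or_eq_true_iff.mp (a1.symm.trans b1)
      have h2 := Bool.or_eq_true_iff.mp (a2.symm.trans b2)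
      have h3 := Bool.or_eq_true_iff.mp (a3.symm.trans b3)
      constructor
      · simp only [Prod.mk.injEq]
        refine ⟨?_, ?_, ?_⟩
        · rcases h1 with h | h <;> simp [h, b1]
        · rcases h2 with h | h <;> simp [h, b2]
        · rcases h3 with h | h <;> simp [h, b3]
      · intro _; simp [b1, b2, b3]
    | false =>
      obtain ⟨ih1, ih2⟩ := ih d' l' s'
      subst a1 a2 a3
      constructor
      · rw [ih1]; simp [Bool.or_assoc]
      · exact ih2

-- ===== VERDICT (by name: the statement is the Claim_ definition above) =====
theorem generate_middle_pattern_py_spec : Claim_equal_generate_middle_pattern_py := by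
  intro mp _
  unfold Spec_generate_middle_pattern_py generate_middle_pattern_py generate_middle_pattern_py_alt
  by_cases hmp : mp.isEmpty
  · simp [hmp]
  · simp only [hmp, Bool.false_eq_true, if_false]
    obtain ⟨s1, s2⟩ := pvScanParts_spec mp false false false
    rcases he : pvScanParts mp false false false with ⟨⟨d, l, s⟩, e⟩
    rw [he] at s1 s2
    simp only [Bool.false_or, Prod.mk.injEq] at s1
    obtain ⟨a1, a2, a3⟩ := s1
    cases e with
    | true =>
      have hall := s2 rfl
      simp only [Prod.mk.injEq] at hall
      obtain ⟨b1, b2, b3⟩ := hall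
      simp [← a1, ← a2, ← a3, b1, b2, b3]
    | false =>
      simp [← a1, ← a2, ← a3]
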